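/- GENERATED by mk_final_copies.py from the proof of the farm's unit `decode_all.2` (farm:decode_all.2.1: Proof.lean) as the
   re-elaboration sweep compiled it — do not edit. -/
import Asan.CheckWalk
import Vorbis.Spec.Units.decode_all_2

/- SEGMENT 2 OF decode_all (`cut1` 10357BH … the loop head 1035C5H, or through `put_header(hdr, error, 0, 0, 0, 0, 0)` to the epilogue's
   head 10351DH; 28 instructions), in the farm's format: from `AtOpen` to `AtLoop 0 0` (stb_vorbis_open_memory returned the arena
   copy) or `AtEpi` (it returned NULL). It consumes `AtOpen` as an ENTRY and builds `AtLoop` and `AtEpi` as exits. The walk starts at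
   `v` in the middle of the function; `u` is the state at the function's entry. -/
open X86 X86.User Asan Vorbis Vorbis.Spec

set_option maxRecDepth 4000
set_option maxHeartbeats 4000000

namespace Vorbis.Spec.decode_all_2

/-- A 32-bit load zero-extends: the word of a small number. -/
theorem seg2_ofBV32 (n : Nat) (h : n < 2 ^ 32) : Word.ofBV (BitVec.ofNat 32 n) = UInt64.ofNat n := by
  apply UInt64.toNat_inj.mp
  unfold Word.ofBV
  simp only [UInt64.toNat_ofBitVec, BitVec.toNat_setWidth, BitVec.toNat_ofNat, UInt64.toNat_ofNat']
  omega

/-- **The caller's footprint through a callee's**: every window of the callee lies inside a window of the caller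
(`Reader.sameExcept_through_callee`, which this unit's statement does not import). -/
theorem seg2_through_callee {ws ws' : List Span} {m0 m1 m2 : Mem} (h : Mem.SameExcept ws m0 m1)
    (hs : Mem.SameExcept ws' m1 m2) (hsub : ∀ w ∈ ws', InSpans ws w.lo (w.hi - w.lo)) : Mem.SameExcept ws m0 m2 := by
  apply h.step_same hs
  intro w hw a h1 h2
  obtain ⟨w', hw', k1, k2⟩ := hsub w hw
  exact ⟨w', hw', by omega, by omega⟩

/-- The first 32 bytes of OUT are live (put_header's `hdr`): OUT is one of the fixed objects. -/
theorem seg2_hdr_live {len : Nat} {others : List Obj} {frames : List (Nat × FrameLayout)}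
    (hfix : Top.FixedLive len others frames) : LiveBytes others frames 0x400000 32 := by
  have hO : listBlk (fixedBlocks len) blockOUT := by
    simp only [listBlk, fixedBlocks, List.mem_cons, true_or, or_true]
  refine LiveBytes.of_block (hfix.blk _ hO) ?_ ?_
  · simp only [blockOUT]
    omega
  · simp only [blockOUT]
    omega

end Vorbis.Spec.decode_all_2

open Vorbis.Spec.decode_all_2

/-- **Segment 2**: see the head of this file. -/
theorem Vorbis.Spec.Worked.decode_all_2_ok : Vorbis.Spec.decode_all_2.Statement := by
  intro Lay hLay μ hμ u₀ hcode h_load4 h_put others frames len u ret others' v hat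
  obtain ⟨j_rip, hfrm, c_r13, c_rbx, c_rbp, k_room, k_len, hopened⟩ := hat
  have he := hfrm.entry
  have he0 := he
  have hpre0 := hfrm.pre
  have hpre := hpre0
  v_entry he
  obtain ⟨hsh, hrdi, hrsi, hlen, hrdx, hrcx, hr8, hr9, hfix, hfree, hconsts⟩ := hpre
  obtain ⟨_, _, c_rsp, k_r15, k_r14, k_r13, k_r12, k_rbp, k_rbx, k_ret, k_out, hsame, j_code, j_inv, hinv, hfixed, hoffT⟩ := hfrm
  have hput := h_put others' (decode_all.ownFrames u frames)
  clear h_put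
  obtain ⟨z, c_rax⟩ : ∃ z, v.reg .rax = z := ⟨_, rfl⟩
  rw [c_rax] at hopened
  -- the callee's result, as an implication: a non-NULL result is the arena copy with its invariant
  have hnz : ¬ z.toNat = 0 → ∃ (A : Arena) (ysz : Nat → Nat), A.B = 0x800000 ∧ A.L = 0x400000 ∧
      DecodeInv others' (decode_all.ownFrames u frames) len A 0 0 ysz v.mem z.toNat := by
    intro hne
    rcases hopened with h0 | h1
    · exfalso
      apply hne
      rw [h0]
      rfl
    · exact h1
  clear hopened
  have w_rip := j_rip
  have w_eq := Vorbis.conv_code_eqOn j_code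
  have hdf : v.flags .df = false := (show X86.User.abiInv _ from j_inv).1
  have hmx : v.mxcsr &&& 0x1F80 = 0x1F80 := (show X86.User.abiInv _ from j_inv).2
  have w_kept : RegsKept [.rsp] v v := RegsKept.refl _ _
  u_walk hcode [hμ.vendor] until [Vorbis.L.decode_all.loop1, Vorbis.L.decode_all.at_10351d] span [Vorbis.L.textLo, Vorbis.L.textHi] side (v_side)
  case call_inv =>
    v_inv
  case pre_10362d =>
    -- put_header's precondition: the shadow layer over the two pushed words, `hdr` = OUT's first 32 bytes
    have e_rsp : (s_10362d.reg .rsp).toNat + 8 = (u.reg .rsp).toNat - 248 := by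
      rw [w_rsp]
      u_omega
    have hinv' : ShadowInv others' (decode_all.ownFrames u frames) ((u.reg .rsp).toNat - 248) s_10362d.mem := by
      rw [w_mem]
      refine ShadowInv.writeLE ?_ _ _ _ (by u_omega) (by u_omega)
      refine ShadowInv.writeLE ?_ _ _ _ (by u_omega) (by u_omega)
      exact hinv.lower (by omega) (by omega) (by omega)
    refine ⟨⟨?_, hoffT⟩, ?_, ?_⟩
    · rw [e_rsp]
      exact hinv'
    · rw [w_rdi]
      exact seg2_hdr_live hfixed
    · rw [w_rsp]
      u_omega
  case check_10358b =>
    obtain ⟨A, ysz, hAB, hAL, hdi⟩ := hnz hbr_103581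
    have hobj := hdi.objLive
    have hwhere := hobj.where_ hinv hoffT (by decide)
    simp only [Off.sizeof.stb_vorbis] at hwhere
    have hun : ShadowUntouched v.mem s_10358b.mem := by v_untouched
    refine hobj.accSmall hinv hun _ 4 (by decide) (by u_omega) ?_
    simp only [Vorbis.Off.sizeof.stb_vorbis]
    u_omega
  case check_10359b =>
    obtain ⟨A, ysz, hAB, hAL, hdi⟩ := hnz hbr_103581
    have hobj := hdi.objLive
    have hwhere := hobj.where_ hinv hoffT (by decide)
    simp only [Off.sizeof.stb_vorbis] at hwhere
    have hun : ShadowUntouched v.mem s_10359b.mem := by v_untouched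
    refine hobj.accSmall hinv hun _ 4 (by decide) (by u_omega) ?_
    simp only [Vorbis.Off.sizeof.stb_vorbis]
    u_omega
  · -- 0x103632, after put_header (open failed): on to the epilogue's head with eax = 32
    v_after_call w_rsp_10362d w_mem_10362d
    simp only [w_rdi_10362d] at w_same
    have q15 : UInt64.ofNat (s_10362dr.mem.readLE (u.reg .rsp - 8) 8) = u.reg .r15 := by u_frame k_r15
    have q14 : UInt64.ofNat (s_10362dr.mem.readLE (u.reg .rsp - 16) 8) = u.reg .r14 := by u_frame k_r14
    have q13 : UInt64.ofNat (s_10362dr.mem.readLE (u.reg .rsp - 24) 8) = u.reg .r13 := by u_frame k_r13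
    have q12 : UInt64.ofNat (s_10362dr.mem.readLE (u.reg .rsp - 32) 8) = u.reg .r12 := by u_frame k_r12
    have qbp : UInt64.ofNat (s_10362dr.mem.readLE (u.reg .rsp - 40) 8) = u.reg .rbp := by u_frame k_rbp
    have qbx : UInt64.ofNat (s_10362dr.mem.readLE (u.reg .rsp - 48) 8) = u.reg .rbx := by u_frame k_rbx
    have q0 : UInt64.ofNat (s_10362dr.mem.readLE (u.reg .rsp) 8) = ret := by u_frame k_ret
    have qout : s_10362dr.mem.readLE (u.reg .rsp - 216) 8 = 4194304 := by u_frame k_out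
    have hpush : Mem.SameExcept [⟨(u.reg .rsp).toNat - 6448, (u.reg .rsp).toNat⟩, ⟨0x400000, 0x700000⟩,
        ⟨0x800000, 0xC00000⟩, ⟨0xC00000, 0xE00000⟩, ⟨0x121c00, 0x122000⟩] u.mem ((v.mem.writeLE (u.reg .rsp - 248) 8 0).writeLE (u.reg .rsp - 256) 8
        (UInt64.toNat (L.decode_all.cut1 + 183))) := by
      refine Mem.SameExcept.step_writeLE' (u.reg .rsp - 256) 8 _ ?_ (by u_omega) (by u_same_side)
      exact Mem.SameExcept.step_writeLE' (u.reg .rsp - 248) 8 _ hsame (by u_omega) (by u_same_side)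
    have hsame' := seg2_through_callee hpush w_same (by
      simp only [List.forall_mem_cons, List.not_mem_nil, false_imp_iff, implies_true, and_true, X86.User.inSpans_cons,
        X86.User.inSpans_nil, or_false]
      repeat' apply And.intro
      all_goals u_omega)
    have hinv1 : ShadowInv others' (decode_all.ownFrames u frames) ((u.reg .rsp).toNat - 232) s_10362dr.mem := by
      refine ShadowInv.untouched ?_ w_post
      rw [w_mem_10362d]
      refine ShadowInv.writeLE ?_ _ _ _ (by u_omega) (by u_omega)
      exact ShadowInv.writeLE hinv _ _ _ (by u_omega) (by u_omega)
    clear w_same w_post hpush hsame k_r15 k_r14 k_r13 k_r12 k_rbp k_rbx k_ret k_out hinv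
    u_walk hcode [hμ.vendor] until [Vorbis.L.decode_all.at_10351d] span [Vorbis.L.textLo, Vorbis.L.textHi] side (v_side)
    refine ReachVia.done (Or.inr ?_)
    have hfrm' : decode_all.DFrame others frames len u₀ u ret others' s_10363b := by
      refine ⟨he0, hpre0, w_rsp, ?_, ?_, ?_, ?_, ?_, ?_, ?_, ?_, ?_, Vorbis.conv_code_in w_eq, ?_, ?_, hfixed, hoffT⟩
      · rw [w_mem]
        exact q15
      · rw [w_mem]
        exact q14
      · rw [w_mem]
        exact q13
      · rw [w_mem]
        exact q12
      · rw [w_mem]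
        exact qbp
      · rw [w_mem]
        exact qbx
      · rw [w_mem]
        exact q0
      · rw [w_mem]
        exact qout
      · rw [w_mem]
        exact hsame'
      · v_inv
      · rw [w_mem]
        exact hinv1
    have e32 : (Word.ofBV (32#32) : Word).toNat = 32 := rfl
    refine ⟨w_rip, hfrm', ?_, ?_, ?_⟩
    · rw [w_kept .r13 rfl]
      exact c_r13
    · rw [w_rax, e32]
      omega
    · rw [w_rax, e32]
      omega
  · -- 0x1035c5 = loop1: the loop head with k = 0, st = 0
    obtain ⟨A, ysz, hAB, hAL, hdi⟩ := hnz hbr_103581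
    refine ReachVia.done (Or.inl ⟨A, ysz, z.toNat, ?_⟩)
    have hinv' : ShadowInv others' (decode_all.ownFrames u frames) ((u.reg .rsp).toNat - 232) s_1035c0.mem := by
      rw [w_mem]
      repeat (refine ShadowInv.writeLE ?_ _ _ _ (by u_omega) (by u_omega))
      exact hinv
    have hs : Mem.SameExcept [⟨(u.reg .rsp).toNat - 240, (u.reg .rsp).toNat⟩, ⟨0xC00000, 0xE00000⟩] v.mem s_1035c0.mem := by
      u_same
    have hk : AllKept (RunBlk A len) v.mem s_1035c0.mem := decode_all.da_allKept_stack_shadow hdi hs (by omega) (by omega)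
    have hdi' := hdi.carry hinv hk hinv'
    have hfrm' : decode_all.DFrame others frames len u₀ u ret others' s_1035c0 := by
      refine ⟨he0, hpre0, w_rsp, ?_, ?_, ?_, ?_, ?_, ?_, ?_, ?_, ?_, Vorbis.conv_code_in w_eq, ?_, hinv', hfixed, hoffT⟩
      · u_resolve
      · u_resolve
      · u_resolve
      · u_resolve
      · u_resolve
      · u_resolve
      · u_resolve
      · u_resolve
      · rw [w_mem]
        u_same
      · v_inv
    refine ⟨w_rip, ⟨hfrm', ?_, ?_, ?_, ?_, ?_, ?_, ?_, by omega, ⟨hAB, hAL⟩, hdi'⟩, ?_, Nat.zero_le _⟩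
    · rw [w_kept .rbx rfl]
      exact c_rbx
    · rw [w_kept .rbp rfl]
      exact c_rbp
    · rw [w_r14]
    · rw [w_r13]
      exact seg2_ofBV32 len (by omega)
    · rw [w_mem]
      u_read
    · u_resolve
    · rw [w_mem]
      u_read
    · rw [w_r12]
      rfl
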